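-- pv_equiv track=rewrite | github.com/iooj-max/intelligent-parking-chatbot | src/data/chunker.py | chunk_by_paragraphs
-- ===== SOURCE A (Python) =====
-- from typing import List, Tuple
--
-- def chunk_by_paragraphs(text: str, max_paragraphs: int = 3) -> List[Tuple[str, int]]:
--     """
--     Split text into chunks of N paragraphs.
--
--     Useful as fallback when heading-based chunking produces very large chunks.
--
--     Args:
--         text: Text content
--         max_paragraphs: Maximum paragraphs per chunk
--
--     Returns:
--         List of tuples (chunk_text, chunk_index)
--     """
--     # Split by double newlines (paragraph boundaries)
--     paragraphs = [p.strip() for p in text.split("\n\n") if p.strip()]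
--
--     chunks = []
--     for i in range(0, len(paragraphs), max_paragraphs):
--         chunk_paragraphs = paragraphs[i : i + max_paragraphs]
--         chunk_text = "\n\n".join(chunk_paragraphs)
--         chunks.append((chunk_text, i // max_paragraphs))
--
--     return chunks
-- ===== SOURCE B (Python) =====
-- from typing import List, Tuple
--
-- def chunk_by_paragraphs(text: str, max_paragraphs: int = 3) -> List[Tuple[str, int]]:
--     paragraphs = [p.strip() for p in text.split("\n\n") if p.strip()]
--     chunks = []
--     buf = []
--     for p in paragraphs:
--         buf.append(p)
--         if len(buf) == max_paragraphs:
--             chunks.append(("\n\n".join(buf), len(chunks)))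
--             buf = []
--     if buf:
--         chunks.append(("\n\n".join(buf), len(chunks)))
--     return chunks
-- ===== Notes on version B (the rewrite author's own statement) =====
-- stated objective: alternative
-- what changed: Replaces index-based range-stepping with slicing (and i//max_paragraphs chunk indices) by a single per-paragraph pass into a running buffer that is flushed each time it reaches max_paragraphs, with an incrementing chunk counter and a final flush of the remainder.
-- outside the precondition, e.g. on chunk_by_paragraphs('a\n\nb', -1): A returns [], B returns [('a\n\nb', 0)]
import Mathlib
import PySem

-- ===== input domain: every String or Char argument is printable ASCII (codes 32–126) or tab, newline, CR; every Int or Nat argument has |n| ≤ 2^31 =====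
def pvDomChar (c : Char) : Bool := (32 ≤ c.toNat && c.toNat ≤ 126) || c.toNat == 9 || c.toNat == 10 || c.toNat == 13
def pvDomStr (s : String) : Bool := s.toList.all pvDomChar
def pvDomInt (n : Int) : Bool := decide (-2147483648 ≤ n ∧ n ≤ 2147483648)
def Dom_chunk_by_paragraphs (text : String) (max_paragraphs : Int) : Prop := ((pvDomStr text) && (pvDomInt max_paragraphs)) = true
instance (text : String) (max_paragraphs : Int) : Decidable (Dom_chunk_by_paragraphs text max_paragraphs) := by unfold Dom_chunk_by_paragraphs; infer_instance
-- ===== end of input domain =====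

-- B replaces A's range-stepping with slices by a single per-paragraph pass into a running
-- buffer flushed at max_paragraphs (alternative decomposition, same cost).


-- ===== PORT A =====
def chunk_by_paragraphs (text : String) (max_paragraphs : Int) : List (String × Int) :=
  let paragraphs := (((PySem.Str.split? text "\n\n").getD []).map PySem.Str.strip).filter
    (fun p => p ≠ "")
  (PySem.List.pyRange 0 (paragraphs.length : Int) max_paragraphs).foldl
    (fun chunks i =>
      let chunk_paragraphs := PySem.List.slice paragraphs (some i) (some (i + max_paragraphs))
      let chunk_text := PySem.Str.join "\n\n" chunk_paragraphs
      chunks ++ [(chunk_text, PySem.Int.floordiv i max_paragraphs)]) []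

-- ===== PORT B =====
def chunk_by_paragraphs_alt (text : String) (max_paragraphs : Int) : List (String × Int) :=
  let paragraphs := (((PySem.Str.split? text "\n\n").getD []).map PySem.Str.strip).filter
    (fun p => p ≠ "")
  let st := paragraphs.foldl
    (fun (st : List (String × Int) × List String) p =>
      let buf := st.2 ++ [p]
      if (buf.length : Int) = max_paragraphs then
        (st.1 ++ [(PySem.Str.join "\n\n" buf, (st.1.length : Int))], ([] : List String))
      else (st.1, buf)) ([], [])
  if st.2 ≠ [] then st.1 ++ [(PySem.Str.join "\n\n" st.2, (st.1.length : Int))] else st.1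

-- ===== PRECONDITION & SPEC =====
-- A raises ValueError (range step 0) when max_paragraphs = 0; for negative max_paragraphs the
-- empty range makes A return [] — an accidental defensible-corner value no caller would specify
-- (a negative chunk size), where B batches everything into one chunk — so Pre_ excludes
-- max_paragraphs ≤ 0.
def Pre_chunk_by_paragraphs (text : String) (max_paragraphs : Int) : Prop :=
  1 ≤ max_paragraphs
instance (text : String) (max_paragraphs : Int) : Decidable (Pre_chunk_by_paragraphs text max_paragraphs) := by unfold Pre_chunk_by_paragraphs; infer_instance

def pvWitness_chunk_by_paragraphs : String × Int := ("a\n\nb\n\nc", 2)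

def Spec_chunk_by_paragraphs (text : String) (max_paragraphs : Int) (out : List (String × Int)) : Prop := out = chunk_by_paragraphs_alt text max_paragraphs
instance (text : String) (max_paragraphs : Int) (out : List (String × Int)) : Decidable (Spec_chunk_by_paragraphs text max_paragraphs out) := by unfold Spec_chunk_by_paragraphs; infer_instance

-- ===== CLAIM (what is proved, stated in full; the proofs are below) =====
def Claim_equal_chunk_by_paragraphs : Prop := ∀ (text : String) (max_paragraphs : Int), Dom_chunk_by_paragraphs text max_paragraphs → Pre_chunk_by_paragraphs text max_paragraphs → Spec_chunk_by_paragraphs text max_paragraphs (chunk_by_paragraphs text max_paragraphs)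

-- ===== LEMMAS AND PROOFS =====

-- common reference shape: the chunk list, one chunk (of ≤ m paragraphs) at a time
def pvChunks (m : Nat) : List String → Nat → List (String × Int)
  | [], _ => []
  | p :: ps, c =>
      (PySem.Str.join "\n\n" (List.take m (p :: ps)), (c : Int)) ::
        pvChunks m (ps.drop (m - 1)) (c + 1)
termination_by l _ => l.length
decreasing_by simp

@[simp] theorem pvChunks_nil (m : Nat) (c : Nat) : pvChunks m [] c = [] := by
  rw [pvChunks]

theorem pvChunks_cons (m : Nat) (hm : 1 ≤ m) (l : List String) (h : l ≠ []) (c : Nat) :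
    pvChunks m l c
      = (PySem.Str.join "\n\n" (l.take m), (c : Int)) :: pvChunks m (l.drop m) (c + 1) := by
  obtain ⟨p, ps, rfl⟩ := List.exists_cons_of_ne_nil h
  obtain ⟨m', rfl⟩ : ∃ m', m = m' + 1 := ⟨m - 1, by omega⟩
  simp only [pvChunks]
  simp

theorem pyRange_pos_cons (a b s : Int) (hs : 0 < s) (h : a < b) :
    PySem.List.pyRange a b s = a :: PySem.List.pyRange (a + s) b s := by
  rw [PySem.List.pyRange_of_pos a b hs, PySem.List.pyRange_of_pos (a+s) b hs]
  simp only [if_pos h]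
  have key : ((b - a + s - 1) / s).toNat
      = (if a + s < b then ((b - (a + s) + s - 1) / s).toNat else 0) + 1 := by
    have h1 : b - a + s - 1 = (b - a - 1) + 1 * s := by ring
    have h2 : (b - a + s - 1) / s = (b - a - 1) / s + 1 := by
      rw [h1, Int.add_mul_ediv_right _ _ (by omega : s ≠ 0)]
    by_cases hc : a + s < b
    · simp only [if_pos hc]
      have h3 : b - (a + s) + s - 1 = b - a - 1 := by ring
      rw [h3, h2]
      have : 0 ≤ (b - a - 1) / s := Int.ediv_nonneg (by omega) (by omega)
      omega
    · simp only [if_neg hc]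
      have : (b - a - 1) / s = 0 := Int.ediv_eq_zero_of_lt (by omega) (by omega)
      rw [h2, this]; rfl
  rw [key, List.range_succ_eq_map]
  simp only [List.map_cons, List.map_map, List.cons.injEq]
  refine ⟨by simp, ?_⟩
  apply List.map_congr_left
  intro k _
  simp only [Function.comp_apply]
  push_cast
  ring

theorem pyRange_pos_nil (a b s : Int) (hs : 0 < s) (h : b ≤ a) :
    PySem.List.pyRange a b s = [] := by
  rw [PySem.List.pyRange_of_pos a b hs, if_neg (by omega)]
  simp

-- A's range-step-m map of slices is the reference chunk list
theorem pvA_eq (m : Nat) (hm : 1 ≤ m) (ps : List String) :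
    ∀ (n j : Nat), ps.length - j * m ≤ n →
      (PySem.List.pyRange ((j * m : Nat) : Int) (ps.length : Int) (m : Int)).map
        (fun i => (PySem.Str.join "\n\n" (PySem.List.slice ps (some i) (some (i + (m : Int)))),
                   PySem.Int.floordiv i (m : Int)))
        = pvChunks m (ps.drop (j * m)) j := by
  intro n
  induction n with
  | zero =>
      intro j hj
      rw [pyRange_pos_nil _ _ _ (by exact_mod_cast hm) (by exact_mod_cast (by omega : ps.length ≤ j * m))]
      rw [List.drop_eq_nil_of_le (by omega)]
      simp
  | succ n ih =>
      intro j hj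
      have hsm : (j + 1) * m = j * m + m := Nat.succ_mul j m
      by_cases hlt : j * m < ps.length
      · rw [pyRange_pos_cons _ _ _ (by exact_mod_cast hm) (by exact_mod_cast hlt)]
        rw [List.map_cons]
        have hslice : PySem.List.slice ps (some ((j * m : Nat) : Int))
            (some (((j * m : Nat) : Int) + (m : Int))) = (ps.drop (j * m)).take m :=
          PySem.List.slice_natCast_add ps (j * m) m
        have hdiv : PySem.Int.floordiv ((j * m : Nat) : Int) (m : Int) = (j : Int) := by
          rw [PySem.Int.floordiv_natCast]
          norm_cast
          exact Nat.mul_div_cancel j (by omega)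
        have hcast : ((j * m : Nat) : Int) + (m : Int) = (((j + 1) * m : Nat) : Int) := by
          push_cast; ring
        rw [hslice, hdiv, hcast, ih (j + 1) (by simp only [hsm]; omega)]
        rw [pvChunks_cons m hm (ps.drop (j * m)) (by
          intro hnil
          have := List.drop_eq_nil_iff.mp hnil
          omega) j]
        rw [List.drop_drop, hsm]
      · rw [pyRange_pos_nil _ _ _ (by exact_mod_cast hm) (by exact_mod_cast (by omega : ps.length ≤ j * m))]
        rw [List.drop_eq_nil_of_le (by omega)]
        simp

-- B's step function and final flush, named for the lemmas
def pvStep (m : Nat) (st : List (String × Int) × List String) (p : String) :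
    List (String × Int) × List String :=
  let buf := st.2 ++ [p]
  if (buf.length : Int) = (m : Int) then
    (st.1 ++ [(PySem.Str.join "\n\n" buf, (st.1.length : Int))], ([] : List String))
  else (st.1, buf)

def pvFlush (st : List (String × Int) × List String) : List (String × Int) :=
  if st.2 ≠ [] then st.1 ++ [(PySem.Str.join "\n\n" st.2, (st.1.length : Int))] else st.1

-- a stretch too short to fill the buffer just accumulates
theorem pvB_small (m : Nat) :
    ∀ (ps buf : List String) (chunks : List (String × Int)),
      buf.length + ps.length < m →
        ps.foldl (pvStep m) (chunks, buf) = (chunks, buf ++ ps) := by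
  intro ps
  induction ps with
  | nil => intro buf chunks _; simp
  | cons p ps ih =>
      intro buf chunks h
      rw [List.foldl_cons]
      have hne : ((buf ++ [p]).length : Int) ≠ (m : Int) := by
        simp only [List.length_append, List.length_cons, List.length_nil]
        simp only [List.length_cons] at h
        intro hc
        omega
      simp only [pvStep, if_neg hne]
      rw [ih (buf ++ [p]) chunks (by simp at h ⊢; omega)]
      simp

-- enough paragraphs to fill the buffer: one chunk is flushed
theorem pvB_block (m : Nat) :
    ∀ (ps buf : List String) (chunks : List (String × Int)),
      buf.length < m → m ≤ buf.length + ps.length →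
        ps.foldl (pvStep m) (chunks, buf)
          = (ps.drop (m - buf.length)).foldl (pvStep m)
              (chunks ++ [(PySem.Str.join "\n\n" (buf ++ ps.take (m - buf.length)),
                           (chunks.length : Int))], []) := by
  intro ps
  induction ps with
  | nil => intro buf chunks h1 h2; simp at h2; omega
  | cons p ps ih =>
      intro buf chunks h1 h2
      rw [List.foldl_cons]
      by_cases hfull : buf.length + 1 = m
      · have heq : ((buf ++ [p]).length : Int) = (m : Int) := by
          simp only [List.length_append, List.length_cons, List.length_nil]
          exact_mod_cast hfull
        simp only [pvStep, if_pos heq]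
        have htk : m - buf.length = 1 := by omega
        rw [htk]
        simp
      · have hne : ((buf ++ [p]).length : Int) ≠ (m : Int) := by
          simp only [List.length_append, List.length_cons, List.length_nil]
          intro hc; apply hfull; exact_mod_cast hc
        simp only [pvStep, if_neg hne]
        obtain ⟨k, hk⟩ : ∃ k, m - buf.length = k + 1 := ⟨m - buf.length - 1, by omega⟩
        rw [ih (buf ++ [p]) chunks (by simp; omega) (by simp at h2 ⊢; omega)]
        have h3 : m - (buf ++ [p]).length = k := by simp; omega
        rw [h3, hk, List.take_succ_cons, List.drop_succ_cons]
        simp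

-- the whole of B (fold then final flush) is the reference chunk list
theorem pvB_eq (m : Nat) (hm : 1 ≤ m) :
    ∀ (n : Nat) (ps : List String), ps.length ≤ n → ∀ (chunks : List (String × Int)),
      pvFlush (ps.foldl (pvStep m) (chunks, [])) = chunks ++ pvChunks m ps chunks.length := by
  intro n
  induction n with
  | zero =>
      intro ps hps chunks
      have : ps = [] := List.length_eq_zero_iff.mp (by omega)
      subst this
      simp [pvFlush]
  | succ n ih =>
      intro ps hps chunks
      rcases hnil : ps with _ | ⟨p, ps'⟩
      · simp [pvFlush]
      · rw [← hnil]
        have hne : ps ≠ [] := by rw [hnil]; simp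
        have hlen : ps.length = ps'.length + 1 := by rw [hnil]; simp
        by_cases hsmall : ps.length < m
        · rw [pvB_small m ps [] chunks (by simpa using hsmall)]
          rw [pvChunks_cons m hm ps hne chunks.length]
          rw [List.drop_eq_nil_of_le (by omega)]
          rw [List.take_of_length_le (by omega)]
          simp [pvFlush, hne]
        · rw [pvB_block m ps [] chunks (by simpa using hm) (by simp; omega)]
          simp only [List.length_nil, Nat.sub_zero, List.nil_append]
          rw [ih (ps.drop m) (by rw [List.length_drop]; omega)]
          rw [pvChunks_cons m hm ps hne chunks.length]
          simp

-- ===== VERDICT (by name: the statement is the Claim_ definition above) =====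
theorem chunk_by_paragraphs_spec : Claim_equal_chunk_by_paragraphs := by
  intro text max_paragraphs _ hpre
  unfold Pre_chunk_by_paragraphs at hpre
  unfold Spec_chunk_by_paragraphs
  obtain ⟨m, rfl⟩ : ∃ m : Nat, max_paragraphs = (m : Int) :=
    ⟨max_paragraphs.toNat, by omega⟩
  have hm : 1 ≤ m := by exact_mod_cast hpre
  show chunk_by_paragraphs text (m : Int) = chunk_by_paragraphs_alt text (m : Int)
  rw [show chunk_by_paragraphs text (m : Int)
      = (PySem.List.pyRange 0 (((((PySem.Str.split? text "\n\n").getD []).map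
            PySem.Str.strip).filter (fun p => p ≠ "")).length : Int) (m : Int)).foldl
          (fun chunks i => chunks ++
            [(PySem.Str.join "\n\n" (PySem.List.slice ((((PySem.Str.split? text "\n\n").getD []).map
                PySem.Str.strip).filter (fun p => p ≠ "")) (some i) (some (i + (m : Int)))),
              PySem.Int.floordiv i (m : Int))]) [] from rfl]
  rw [show chunk_by_paragraphs_alt text (m : Int)
      = pvFlush (((((PySem.Str.split? text "\n\n").getD []).map PySem.Str.strip).filter
            (fun p => p ≠ "")).foldl (pvStep m) ([], [])) from rfl]
  set ps := (((PySem.Str.split? text "\n\n").getD []).map PySem.Str.strip).filter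
    (fun p => p ≠ "") with hps
  rw [PySem.List.foldl_append_singleton_eq_map
    (f := fun i => (PySem.Str.join "\n\n" (PySem.List.slice ps (some i) (some (i + (m : Int)))),
                    PySem.Int.floordiv i (m : Int)))]
  rw [show (0 : Int) = ((0 * m : Nat) : Int) by simp]
  rw [pvA_eq m hm ps ps.length 0 (by omega)]
  rw [pvB_eq m hm ps.length ps (le_refl _) []]
  simp
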